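-- pv_equiv track=rewrite | github.com/NLPRL/EP-2020-Unsupervised-Morphological-Segmentation | main.py | insert_splits
-- ===== SOURCE A (Python) =====
-- def insert_splits(word, count, solutions):
--     # If count == 0, no more insertions necessary. Append current solution and return.
--     if count == 0:
--         solutions.append(word)
--         return solutions
--     # Add a "+" in all possible places
--     for i in range(len(word)):
--         # Construct new split.
--         new_split = word[:i] + "+" + word[i:]
--         # Ignore instances of empty morphs. (for example: "e++xample" will be ignored)
--         if "++" in new_split:
--             continue
--         # Call recursively with a decremented count.
--         insert_splits(new_split, count-1, solutions)
--
--     return solutions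
-- ===== SOURCE B (Python) =====
-- def insert_splits(word, count, solutions):
--     # Iterative breadth-first expansion by levels; leaves at depth `count`
--     # appear in the same left-to-right order as the recursive DFS produces them.
--     level = [word]
--     c = count
--     while c != 0 and level:
--         level = [w[:i] + "+" + w[i:]
--                  for w in level
--                  for i in range(len(w))
--                  if "++" not in w[:i] + "+" + w[i:]]
--         c -= 1
--     if c == 0:
--         solutions.extend(level)
--     return solutions
-- ===== Notes on version B (the rewrite author's own statement) =====
-- stated objective: alternative
-- what changed: Replaces A's recursive depth-first insertion with an iterative breadth-first expansion: one list comprehension per level grows all partial splits at once, and the final level is appended to solutions in a single extend; leaves at depth count appear in the same left-to-right order as A's DFS.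
import Mathlib
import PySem

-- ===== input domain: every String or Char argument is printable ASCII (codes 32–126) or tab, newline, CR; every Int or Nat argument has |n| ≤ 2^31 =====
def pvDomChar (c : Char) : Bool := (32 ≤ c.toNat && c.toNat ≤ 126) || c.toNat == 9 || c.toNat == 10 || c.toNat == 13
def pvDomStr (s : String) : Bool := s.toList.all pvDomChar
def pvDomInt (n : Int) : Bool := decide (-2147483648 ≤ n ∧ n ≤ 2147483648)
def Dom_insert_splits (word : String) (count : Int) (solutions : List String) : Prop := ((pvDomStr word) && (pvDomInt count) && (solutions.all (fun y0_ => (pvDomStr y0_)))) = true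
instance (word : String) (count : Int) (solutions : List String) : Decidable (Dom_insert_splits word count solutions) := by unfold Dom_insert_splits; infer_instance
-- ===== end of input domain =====

-- B replaces A's recursive depth-first insertion with an iterative level-by-level (breadth-first)
-- expansion; same return value and the same final in-place extension of `solutions` (A appends the
-- leaves one by one, B extends once with the final level — the resulting list state is identical).

-- ===== PORT A =====

-- mu is the termination measure shared by both ports: number of '+'-insertion points still usable.
def mu (w : List Char) : Nat := w.length + 1 - 2 * w.count '+'

-- "++" occurs in l iff ['+','+'] is an infix; then 2·(#'+') ≤ |l|+1 (no two '+' adjacent).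
theorem two_count_le : ∀ (l : List Char), PySem.Chars.isIn ['+', '+'] l = false → 2 * l.count '+' ≤ l.length + 1
  | [], _ => by simp
  | [c], _ => by by_cases h : c = '+' <;> simp [h]
  | c1 :: c2 :: t, h => by
      have hni : ¬ (['+', '+'] <:+: (c1 :: c2 :: t)) := (PySem.Chars.isIn_eq_false_iff _ _).mp h
      have h2 : PySem.Chars.isIn ['+', '+'] (c2 :: t) = false :=
        (PySem.Chars.isIn_eq_false_iff _ _).mpr (fun hin => hni (List.infix_cons hin))
      have h3 : PySem.Chars.isIn ['+', '+'] t = false :=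
        (PySem.Chars.isIn_eq_false_iff _ _).mpr
          (fun hin => hni (List.infix_cons (List.infix_cons hin)))
      have ih2 := two_count_le (c2 :: t) h2
      have ih3 := two_count_le t h3
      simp only [List.count_cons, List.length_cons, beq_iff_eq] at ih2 ih3 ⊢
      split_ifs at ih2 ih3 ⊢ <;>
        first
          | omega
          | exact absurd (List.IsPrefix.isInfix (by simp_all)) hni

-- Inserting '+' at position i without creating "++" strictly decreases mu.
theorem mu_insert_lt (w : List Char) (i : Nat)
    (h : PySem.Chars.isIn ['+', '+'] (w.take i ++ '+' :: w.drop i) = false) :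
    mu (w.take i ++ '+' :: w.drop i) < mu w := by
  have hsplit : (w.take i).count '+' + (w.drop i).count '+' = w.count '+' := by
    rw [← List.count_append, List.take_append_drop]
  have hcnt : (w.take i ++ '+' :: w.drop i).count '+'
      = (w.take i).count '+' + ((w.drop i).count '+' + 1) := by
    simp [List.count_append]
  have hlsplit : (w.take i).length + (w.drop i).length = w.length := by
    rw [← List.length_append, List.take_append_drop]
  have hlen : (w.take i ++ '+' :: w.drop i).length
      = (w.take i).length + ((w.drop i).length + 1) := by
    rw [List.length_append, List.length_cons]
  have hb := two_count_le _ h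
  unfold mu
  omega

-- A, transliterated: the recursion works over the word's character list (word[:i]+"+"+word[i:]
-- with 0 ≤ i < len(word) is exactly take i ++ '+' :: drop i; '"++" in s' is PySem.Chars.isIn);
-- the for-loop over range(len(word)) is the mutual helper loopA.
mutual
def insA (w : List Char) (c : Int) (sols : List String) : List String :=
  if c = 0 then sols ++ [String.ofList w]
  else loopA w c sols (List.range w.length)
termination_by (mu w, w.length + 2)

def loopA (w : List Char) (c : Int) (sols : List String) (is : List Nat) : List String :=
  match is with
  | [] => sols
  | i :: rest =>
    let ns := w.take i ++ '+' :: w.drop i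
    if h : PySem.Chars.isIn ['+', '+'] ns then loopA w c sols rest
    else loopA w c (insA ns (c - 1) sols) rest
termination_by (mu w, is.length + 1)
decreasing_by
  all_goals first
    | (apply Prod.Lex.left; exact mu_insert_lt w i (by simpa using h))
    | (apply Prod.Lex.right; simp; try omega)
end

def insert_splits (word : String) (count : Int) (solutions : List String) : List String :=
  insA word.toList count solutions

-- ===== PORT B =====

-- one level of B's list comprehension: all valid single insertions into every word of the level
def expandLevel (lv : List (List Char)) : List (List Char) :=
  lv.flatMap fun w =>
    (List.range w.length).filterMap fun i =>
      let ns := w.take i ++ '+' :: w.drop i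
      if PySem.Chars.isIn ['+', '+'] ns then none else some ns

def maxMu (lv : List (List Char)) : Nat := (lv.map mu).foldr max 0

def measB (lv : List (List Char)) : Nat := if lv = [] then 0 else maxMu lv + 1

theorem le_maxMu {w : List Char} : ∀ (lv : List (List Char)), w ∈ lv → mu w ≤ maxMu lv
  | a :: t, h => by
    rcases List.mem_cons.mp h with h | h
    · simp only [maxMu, List.map_cons, List.foldr_cons, h]
      omega
    · have := le_maxMu t h
      simp only [maxMu, List.map_cons, List.foldr_cons] at *
      omega

theorem maxMu_lt {lv : List (List Char)} {b : Nat} (hne : lv ≠ [])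
    (hall : ∀ x ∈ lv, mu x < b) : maxMu lv < b := by
  induction lv with
  | nil => exact absurd rfl hne
  | cons a t ih =>
    by_cases ht : t = []
    · subst ht; simpa [maxMu] using hall a (by simp)
    · have h1 := hall a (by simp)
      have h2 := ih ht (fun x hx => hall x (by simp [hx]))
      simp only [maxMu, List.map_cons, List.foldr_cons] at *
      omega

theorem mem_expand_lt {x : List Char} {lv : List (List Char)} (h : x ∈ expandLevel lv) :
    mu x < maxMu lv := by
  simp only [expandLevel, List.mem_flatMap, List.mem_filterMap, List.mem_range] at h
  obtain ⟨w, hw, i, _, hx⟩ := h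
  by_cases hb : PySem.Chars.isIn ['+', '+'] (w.take i ++ '+' :: w.drop i)
  · simp [hb] at hx
  · simp [hb] at hx
    subst hx
    exact lt_of_lt_of_le (mu_insert_lt w i (by simpa using hb)) (le_maxMu lv hw)

theorem measB_lt {lv : List (List Char)} (hne : lv ≠ []) : measB (expandLevel lv) < measB lv := by
  by_cases he : expandLevel lv = []
  · simp [measB, he, hne]
  · have := maxMu_lt (b := maxMu lv) he (fun x hx => mem_expand_lt hx)
    simp [measB, he, hne]
    omega

-- B's while-loop: expand the level while c ≠ 0 and the level is nonempty.
def loopB (lv : List (List Char)) (c : Int) : List (List Char) × Int :=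
  if h : c ≠ 0 ∧ lv ≠ [] then loopB (expandLevel lv) (c - 1) else (lv, c)
termination_by measB lv
decreasing_by exact measB_lt h.2

def insert_splits_alt (word : String) (count : Int) (solutions : List String) : List String :=
  let p := loopB [word.toList] count
  if p.2 = 0 then solutions ++ p.1.map String.ofList else solutions

-- ===== PRECONDITION & SPEC =====
def Spec_insert_splits (word : String) (count : Int) (solutions : List String) (out : List String) : Prop := out = insert_splits_alt word count solutions
instance (word : String) (count : Int) (solutions : List String) (out : List String) : Decidable (Spec_insert_splits word count solutions out) := by unfold Spec_insert_splits; infer_instance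

-- ===== CLAIM (what is proved, stated in full; the proofs are below) =====
def Claim_equal_insert_splits : Prop := ∀ (word : String) (count : Int) (solutions : List String), Dom_insert_splits word count solutions → Spec_insert_splits word count solutions (insert_splits word count solutions)

-- ===== LEMMAS AND PROOFS =====

-- DFS run over a whole level of words (A applied in order to each word of the level)
def dfsLevel (lv : List (List Char)) (c : Int) (sols : List String) : List String :=
  lv.foldl (fun acc w => insA w c acc) sols

theorem loopA_eq_foldl (w : List Char) (c : Int) (is : List Nat) (sols : List String) :
    loopA w c sols is =
      (is.filterMap fun i =>
        let ns := w.take i ++ '+' :: w.drop i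
        if PySem.Chars.isIn ['+', '+'] ns then none else some ns).foldl
        (fun acc ns => insA ns (c - 1) acc) sols := by
  induction is generalizing sols with
  | nil => simp [loopA]
  | cons i rest ih =>
    rw [loopA]
    by_cases hb : PySem.Chars.isIn ['+', '+'] (w.take i ++ '+' :: w.drop i) <;>
      · simp only [List.filterMap_cons]
        simp [hb, ih]

theorem dfsLevel_zero (lv : List (List Char)) (sols : List String) :
    dfsLevel lv 0 sols = sols ++ lv.map String.ofList := by
  induction lv generalizing sols with
  | nil => simp [dfsLevel]
  | cons w t ih =>
    simp only [dfsLevel, List.foldl_cons] at *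
    rw [insA]
    simp [ih]

theorem dfsLevel_step (lv : List (List Char)) (c : Int) (sols : List String) (hc : c ≠ 0) :
    dfsLevel lv c sols = dfsLevel (expandLevel lv) (c - 1) sols := by
  induction lv generalizing sols with
  | nil => simp [dfsLevel, expandLevel]
  | cons w t ih =>
    have hw : insA w c sols =
        ((List.range w.length).filterMap fun i =>
          let ns := w.take i ++ '+' :: w.drop i
          if PySem.Chars.isIn ['+', '+'] ns then none else some ns).foldl
          (fun acc ns => insA ns (c - 1) acc) sols := by
      rw [insA, if_neg hc, loopA_eq_foldl]
    have hexp : expandLevel (w :: t) =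
        ((List.range w.length).filterMap fun i =>
          let ns := w.take i ++ '+' :: w.drop i
          if PySem.Chars.isIn ['+', '+'] ns then none else some ns) ++ expandLevel t := by
      simp [expandLevel]
    calc dfsLevel (w :: t) c sols
        = dfsLevel t c (insA w c sols) := rfl
      _ = dfsLevel (expandLevel t) (c - 1) (insA w c sols) := ih _
      _ = dfsLevel (expandLevel (w :: t)) (c - 1) sols := by
            rw [hexp]
            simp only [dfsLevel, List.foldl_append]
            rw [hw]

theorem dfsLevel_loopB (lv : List (List Char)) (c : Int) (sols : List String) :
    dfsLevel lv c sols =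
      if (loopB lv c).2 = 0 then sols ++ ((loopB lv c).1).map String.ofList else sols := by
  induction lv, c using loopB.induct generalizing sols with
  | case1 lv c h ih =>
    rw [loopB, dif_pos h, dfsLevel_step lv c sols h.1, ih]
  | case2 lv c h =>
    rw [loopB, dif_neg h]
    by_cases hc : c = 0
    · subst hc; simp [dfsLevel_zero]
    · have hlv : lv = [] := by tauto
      simp [hc, hlv, dfsLevel]

-- ===== VERDICT (by name: the statement is the Claim_ definition above) =====
theorem insert_splits_spec : Claim_equal_insert_splits := by
  intro word count solutions _
  unfold Spec_insert_splits insert_splits insert_splits_alt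
  have h := dfsLevel_loopB [word.toList] count solutions
  simpa [dfsLevel] using h
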